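-- pv_equiv track=rewrite | github.com/i-krishna/Business-Analytics | Hackathons/HackerRank/countServerFaults.py | countFaults
-- ===== SOURCE A (Python) =====
-- from collections import defaultdict, deque
--
-- def countFaults(n, logs):
--     # Write your code here
--     server_status = defaultdict(deque)
--     replacements = 0
--
--     for log in logs:
--         server_id, status = log.split()
--
--         # Maintain a queue of the last 3 statuses for the server
--         server_status[server_id].append(status)
--         if len(server_status[server_id]) > 3:
--             server_status[server_id].popleft()
--
--         # Check if the server logs three consecutive "error"s
--         if list(server_status[server_id]) == ["error", "error", "error"]:
--             replacements += 1
--             server_status[server_id].clear()  # Reset the server's status after replacement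
--
--     return replacements
-- ===== SOURCE B (Python) =====
-- def countFaults(n, logs):
--     # Pass 1: group the status stream per server (per-server streams are
--     # independent, so interleaving does not matter for the total).
--     per = {}
--     for log in logs:
--         server_id, status = log.split()
--         per.setdefault(server_id, []).append(status)
--     # Pass 2: per server, count completed runs of three consecutive errors.
--     total = 0
--     for statuses in per.values():
--         run = 0
--         for s in statuses:
--             if s == "error":
--                 run += 1
--                 if run == 3:
--                     total += 1
--                     run = 0
--             else:
--                 run = 0
--     return total
-- ===== Notes on version B (the rewrite author's own statement) =====
-- stated objective: alternative
-- what changed: Replaces the single interleaved loop that keeps a deque of each server's last three statuses (append/popleft/list-compare/clear) with a two-pass algorithm: first group the status stream per server, then for each server independently count completed runs of three consecutive errors with a scalar run counter and sum the counts.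
import Mathlib
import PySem

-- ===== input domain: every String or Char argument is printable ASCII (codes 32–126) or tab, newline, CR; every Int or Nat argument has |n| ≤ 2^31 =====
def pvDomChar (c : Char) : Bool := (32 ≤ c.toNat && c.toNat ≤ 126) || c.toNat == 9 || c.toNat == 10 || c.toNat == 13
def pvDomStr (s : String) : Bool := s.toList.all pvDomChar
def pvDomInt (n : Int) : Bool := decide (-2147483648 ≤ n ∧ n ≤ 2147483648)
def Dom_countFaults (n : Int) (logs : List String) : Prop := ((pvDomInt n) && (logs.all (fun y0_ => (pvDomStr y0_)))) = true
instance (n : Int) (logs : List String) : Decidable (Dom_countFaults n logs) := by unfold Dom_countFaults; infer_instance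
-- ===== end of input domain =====

-- B replaces A's single interleaved loop with a per-server deque by a two-pass
-- algorithm: group the statuses per server, then sum per-server run counts
-- (objective: alternative; per-server streams are independent, so grouping is exact).

-- ===== PORT A =====
-- state: (dict server_id -> deque of last statuses, replacements)
def countFaultsStepA (st : PySem.Dict String (List String) × Int) (log : String) :
    PySem.Dict String (List String) × Int :=
  match PySem.Str.split₀ log with
  | [server_id, status] =>
      let q0 := (st.1.getD server_id []) ++ [status]
      let q := if q0.length > 3 then q0.tail else q0
      if q = ["error", "error", "error"] then
        (st.1.insert server_id [], st.2 + 1)      -- replacements += 1; clear()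
      else
        (st.1.insert server_id q, st.2)
  | _ => st                                        -- unreachable under Pre_ (unpacking raises)

def countFaults (n : Int) (logs : List String) : Int :=
  (logs.foldl countFaultsStepA (PySem.Dict.empty, 0)).2

-- ===== PORT B =====
-- pass 1: per.setdefault(server_id, []).append(status)
def groupStep (d : PySem.Dict String (List String)) (log : String) :
    PySem.Dict String (List String) :=
  match PySem.Str.split₀ log with
  | [server_id, status] => d.modify server_id [] (· ++ [status])
  | _ => d                                         -- unreachable under Pre_ (unpacking raises)

def groupLogs (logs : List String) : PySem.Dict String (List String) :=
  logs.foldl groupStep PySem.Dict.empty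

-- pass 2 inner step on (run, total)
def runStep (st : Int × Int) (s : String) : Int × Int :=
  if s = "error" then
    let r := st.1 + 1
    if r = 3 then (0, st.2 + 1) else (r, st.2)
  else (0, st.2)

def countFaults_alt (n : Int) (logs : List String) : Int :=
  (groupLogs logs).values.foldl (fun total statuses => (statuses.foldl runStep (0, total)).2) 0

-- ===== PRECONDITION & SPEC =====
-- Pre_ excludes logs that do not split into exactly two whitespace-separated
-- tokens: Python A raises ValueError (unpacking) on such lines.
def Pre_countFaults (n : Int) (logs : List String) : Prop :=
  ∀ log ∈ logs, (PySem.Str.split₀ log).length = 2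
instance (n : Int) (logs : List String) : Decidable (Pre_countFaults n logs) := by
  unfold Pre_countFaults; infer_instance
def pvWitness_countFaults : Int × List String :=
  (2, ["s1 error", "s2 error", "s1 error", "s1 error", "s1 ok"])

def Spec_countFaults (n : Int) (logs : List String) (out : Int) : Prop := out = countFaults_alt n logs
instance (n : Int) (logs : List String) (out : Int) : Decidable (Spec_countFaults n logs out) := by unfold Spec_countFaults; infer_instance

-- ===== CLAIM (what is proved, stated in full; the proofs are below) =====
def Claim_equal_countFaults : Prop := ∀ (n : Int) (logs : List String), Dom_countFaults n logs → Pre_countFaults n logs → Spec_countFaults n logs (countFaults n logs)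

-- ===== LEMMAS AND PROOFS =====

-- ---- stage 1: A's deque fold is simulated by an interleaved run-counter fold (proof device) ----

-- proof-only helper: interleaved fold keeping a per-server run counter
def stepC (st : PySem.Dict String Int × Int) (log : String) :
    PySem.Dict String Int × Int :=
  match PySem.Str.split₀ log with
  | [server_id, status] =>
      if status = "error" then
        let c := st.1.getD server_id 0 + 1
        if c = 3 then (st.1.insert server_id 0, st.2 + 1)
        else (st.1.insert server_id c, st.2)
      else
        (st.1.insert server_id 0, st.2)
  | _ => st

-- number of trailing "error" entries of a deque
def trailN (q : List String) : Nat := (q.reverse.takeWhile (· == "error")).length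

-- simulation invariant: the counter is the trailing-error run length of A's deque
def InvCF (dA : PySem.Dict String (List String)) (dB : PySem.Dict String Int) : Prop :=
  ∀ k : String, dB.getD k 0 = (trailN (dA.getD k []) : Int) ∧
    (dA.getD k []).length ≤ 3 ∧ trailN (dA.getD k []) ≤ 2

theorem trailN_append_error (q : List String) : trailN (q ++ ["error"]) = trailN q + 1 := by
  simp [trailN]

theorem trailN_append_ne (q : List String) (s : String) (h : s ≠ "error") :
    trailN (q ++ [s]) = 0 := by
  simp [trailN, h]

theorem trailN_le_length (q : List String) : trailN q ≤ q.length := by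
  simpa [trailN] using (List.takeWhile_prefix (l := q.reverse) (· == "error")).length_le

theorem trailN_tail (x : String) (rest : List String)
    (h : trailN (x :: rest) ≤ rest.length) : trailN rest = trailN (x :: rest) := by
  have hrw : trailN (x :: rest) = ((rest.reverse ++ [x]).takeWhile (· == "error")).length := by
    simp [trailN]
  rw [List.takeWhile_append] at hrw
  by_cases hc : (rest.reverse.takeWhile (· == "error")).length = rest.reverse.length
  · rw [if_pos hc] at hrw
    have h1 : (List.takeWhile (· == "error") [x]).length ≤ 1 :=
      (List.takeWhile_prefix (l := [x]) (· == "error")).length_le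
    have h2 : trailN rest = rest.length := by simpa [trailN] using hc
    simp only [List.length_append, List.length_reverse] at hrw hc
    omega
  · rw [if_neg hc] at hrw
    simpa [trailN] using hrw.symm

theorem trailN_three (q : List String) (h1 : trailN q = 3) (h2 : q.length = 3) :
    q = ["error", "error", "error"] := by
  have heq : q.reverse.takeWhile (· == "error") = q.reverse :=
    (List.takeWhile_prefix (· == "error")).eq_of_length (by simp [trailN] at h1; simp [h1, h2])
  have hall := List.takeWhile_eq_self_iff.mp heq
  have : q = List.replicate 3 "error" := List.eq_replicate_iff.mpr
    ⟨h2, fun b hb => by simpa using hall b (by simpa using hb)⟩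
  simpa [List.replicate] using this

-- one deque update: length stays ≤ 3 and the trailing-error count evolves like the counter
theorem deque_update (q : List String) (s : String) (hlen : q.length ≤ 3) (htr : trailN q ≤ 2) :
    ((if (q ++ [s]).length > 3 then (q ++ [s]).tail else q ++ [s]).length ≤ 3) ∧
      trailN (if (q ++ [s]).length > 3 then (q ++ [s]).tail else q ++ [s]) =
        (if s = "error" then trailN q + 1 else 0) := by
  have htr1 : trailN (q ++ [s]) = if s = "error" then trailN q + 1 else 0 := by
    by_cases hs : s = "error"
    · simp [hs, trailN_append_error]
    · simp [hs, trailN_append_ne q s hs]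
  by_cases hl : (q ++ [s]).length > 3
  · rw [if_pos hl]
    have hq3 : q.length = 3 := by simp at hl; omega
    rcases q with _ | ⟨x, rest⟩
    · simp at hq3
    · have hrest : rest.length = 2 := by simpa using hq3
      have hcons : (x :: rest) ++ [s] = x :: (rest ++ [s]) := by simp
      rw [hcons]
      have htail : trailN (rest ++ [s]) = trailN (x :: (rest ++ [s])) := by
        apply trailN_tail
        rw [← hcons, htr1]
        by_cases hs : s = "error" <;> simp [hs, hrest] <;> omega
      constructor
      · simp [hrest]
      · rw [List.tail_cons, htail, ← hcons, htr1]
  · rw [if_neg hl]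
    exact ⟨by simp at hl ⊢; omega, htr1⟩

theorem trailN_ne_three (q : List String) (h : trailN q ≤ 2) :
    q ≠ ["error", "error", "error"] := by
  intro hq; subst hq; simp [trailN] at h

theorem stepCF_sim (log : String) (dA : PySem.Dict String (List String))
    (dB : PySem.Dict String Int) (r : Int) (h : InvCF dA dB) :
    InvCF (countFaultsStepA (dA, r) log).1 (stepC (dB, r) log).1 ∧
      (countFaultsStepA (dA, r) log).2 = (stepC (dB, r) log).2 := by
  rcases hsp : PySem.Str.split₀ log with _ | ⟨sid, _ | ⟨status, _ | ⟨w, t⟩⟩⟩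
  · exact ⟨by simpa [countFaultsStepA, stepC, hsp] using h,
      by simp [countFaultsStepA, stepC, hsp]⟩
  · exact ⟨by simpa [countFaultsStepA, stepC, hsp] using h,
      by simp [countFaultsStepA, stepC, hsp]⟩
  · obtain ⟨hc, hlen, htr⟩ := h sid
    obtain ⟨hlen2, htr2⟩ := deque_update (dA.getD sid []) status hlen htr
    simp only [countFaultsStepA, stepC, hsp]
    by_cases hst : status = "error"
    · rw [if_pos hst]
      by_cases h2 : trailN (dA.getD sid []) = 2
      · -- the third consecutive error: both sides count and reset
        have hq3 : (if ((dA.getD sid []) ++ [status]).length > 3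
            then ((dA.getD sid []) ++ [status]).tail
            else (dA.getD sid []) ++ [status]) = ["error", "error", "error"] := by
          apply trailN_three
          · rw [htr2, if_pos hst, h2]
          · have := trailN_le_length (if ((dA.getD sid []) ++ [status]).length > 3
              then ((dA.getD sid []) ++ [status]).tail else (dA.getD sid []) ++ [status])
            rw [htr2, if_pos hst, h2] at this
            omega
        have hcB : dB.getD sid 0 + 1 = 3 := by rw [hc, h2]; rfl
        rw [if_pos hq3, if_pos hcB]
        refine ⟨fun k => ?_, rfl⟩
        by_cases hk : k = sid
        · simp [hk, PySem.Dict.getD_insert_self, trailN]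
        · simpa [PySem.Dict.getD_insert, hk] using h k
      · -- run still below three: both sides store the incremented state
        have hq3 : (if ((dA.getD sid []) ++ [status]).length > 3
            then ((dA.getD sid []) ++ [status]).tail
            else (dA.getD sid []) ++ [status]) ≠ ["error", "error", "error"] := by
          apply trailN_ne_three
          rw [htr2, if_pos hst]
          omega
        have hcB : ¬ dB.getD sid 0 + 1 = 3 := by
          rw [hc]
          intro hx
          exact h2 (by exact_mod_cast (by omega : (trailN (dA.getD sid []) : Int) = 2))
        rw [if_neg hq3, if_neg hcB]
        refine ⟨fun k => ?_, rfl⟩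
        by_cases hk : k = sid
        · subst hk
          refine ⟨?_, by simpa [PySem.Dict.getD_insert_self] using hlen2, ?_⟩
          · rw [PySem.Dict.getD_insert_self, PySem.Dict.getD_insert_self, hc, htr2, if_pos hst]
            push_cast; ring
          · rw [PySem.Dict.getD_insert_self, htr2, if_pos hst]; omega
        · simpa [PySem.Dict.getD_insert, hk] using h k
    · -- a non-error status: deque ends in a non-error, counter resets to 0
      rw [if_neg hst]
      have hq3 : (if ((dA.getD sid []) ++ [status]).length > 3
          then ((dA.getD sid []) ++ [status]).tail
          else (dA.getD sid []) ++ [status]) ≠ ["error", "error", "error"] := by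
        apply trailN_ne_three
        rw [htr2, if_neg hst]
        omega
      rw [if_neg hq3]
      refine ⟨fun k => ?_, rfl⟩
      by_cases hk : k = sid
      · subst hk
        refine ⟨?_, by simpa [PySem.Dict.getD_insert_self] using hlen2, ?_⟩
        · rw [PySem.Dict.getD_insert_self, PySem.Dict.getD_insert_self, htr2, if_neg hst]; rfl
        · rw [PySem.Dict.getD_insert_self, htr2, if_neg hst]; omega
      · simpa [PySem.Dict.getD_insert, hk] using h k
  · exact ⟨by simpa [countFaultsStepA, stepC, hsp] using h,
      by simp [countFaultsStepA, stepC, hsp]⟩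

theorem foldCF_sim (logs : List String) (dA : PySem.Dict String (List String))
    (dB : PySem.Dict String Int) (r : Int) (h : InvCF dA dB) :
    (logs.foldl countFaultsStepA (dA, r)).2 = (logs.foldl stepC (dB, r)).2 := by
  induction logs generalizing dA dB r with
  | nil => rfl
  | cons log rest ih =>
      obtain ⟨h1, h2⟩ := stepCF_sim log dA dB r h
      simp only [List.foldl_cons]
      calc (rest.foldl countFaultsStepA (countFaultsStepA (dA, r) log)).2
          = (rest.foldl stepC ((stepC (dB, r) log).1,
              (countFaultsStepA (dA, r) log).2)).2 := ih _ _ _ h1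
        _ = _ := by rw [h2]

-- ---- stage 2: the interleaved counter fold equals B's group-then-sum computation ----

-- the statuses of server k, in order (B's per[k])
def projOne (k : String) (log : String) : Option String :=
  match PySem.Str.split₀ log with
  | [sid, st] => if sid = k then some st else none
  | _ => none

def projCF (L : List String) (k : String) : List String :=
  L.filterMap (projOne k)

theorem projCF_cons_two (log : String) (rest : List String) (k sid st : String)
    (hsp : PySem.Str.split₀ log = [sid, st]) :
    projCF (log :: rest) k = if sid = k then st :: projCF rest k else projCF rest k := by
  have h1 : projOne k log = if sid = k then some st else none := by
    simp only [projOne, hsp]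
  by_cases hk : sid = k
  · simp only [projCF, List.filterMap_cons, h1, if_pos hk]
  · simp only [projCF, List.filterMap_cons, h1, if_neg hk]

theorem runStep_shift_one (c t : Int) (s : String) :
    runStep (c, t) s = ((runStep (c, 0) s).1, t + (runStep (c, 0) s).2) := by
  simp only [runStep]
  split_ifs <;> simp

theorem runStep_shift (ss : List String) (c t : Int) :
    ss.foldl runStep (c, t) = ((ss.foldl runStep (c, 0)).1, t + (ss.foldl runStep (c, 0)).2) := by
  induction ss generalizing c t with
  | nil => simp
  | cons s ss ih =>
      simp only [List.foldl_cons]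
      rw [runStep_shift_one c t s, ih _ (t + (runStep (c, 0) s).2)]
      conv_rhs => rw [← Prod.mk.eta (p := runStep (c, 0) s),
        ih (runStep (c, 0) s).1 (runStep (c, 0) s).2]
      simp [add_assoc]

theorem sum_update (K : List String) (f g : String → Int) (sid : String) (δ : Int)
    (hnd : K.Nodup) (hsid : sid ∈ K) (hf : f sid = δ + g sid)
    (hfg : ∀ k, k ≠ sid → f k = g k) :
    (K.map f).sum = δ + (K.map g).sum := by
  induction K with
  | nil => simp at hsid
  | cons a K ih =>
      obtain ⟨ha, hnd'⟩ := List.nodup_cons.mp hnd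
      rcases List.mem_cons.mp hsid with h | h
      · subst h
        have : K.map f = K.map g :=
          List.map_congr_left (fun k hk => hfg k (fun he => ha (he ▸ hk)))
        simp only [List.map_cons, List.sum_cons, this, hf]
        ring
      · have hfa : f a = g a := hfg a (fun he => ha (he ▸ h))
        simp only [List.map_cons, List.sum_cons, hfa, ih hnd' h]
        ring

theorem stepC_runStep (log sid st : String) (d : PySem.Dict String Int) (r : Int)
    (hsp : PySem.Str.split₀ log = [sid, st]) :
    stepC (d, r) log =
      (d.insert sid (runStep (d.getD sid 0, 0) st).1, r + (runStep (d.getD sid 0, 0) st).2) := by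
  simp only [stepC, hsp, runStep]
  split_ifs <;> simp

theorem foldC_sum (L : List String) (K : List String) (d : PySem.Dict String Int) (r : Int)
    (hnd : K.Nodup)
    (hmem : ∀ log ∈ L, ∀ sid st, PySem.Str.split₀ log = [sid, st] → sid ∈ K) :
    (L.foldl stepC (d, r)).2
      = r + (K.map (fun k => ((projCF L k).foldl runStep (d.getD k 0, 0)).2)).sum := by
  induction L generalizing d r with
  | nil => simp [projCF]
  | cons log rest ih =>
      have hmem' : ∀ l ∈ rest, ∀ sid st, PySem.Str.split₀ l = [sid, st] → sid ∈ K :=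
        fun l hl => hmem l (List.mem_cons_of_mem _ hl)
      rcases hsp : PySem.Str.split₀ log with _ | ⟨sid, _ | ⟨st, _ | ⟨w, t⟩⟩⟩
      · simp only [List.foldl_cons]
        rw [show stepC (d, r) log = (d, r) by simp [stepC, hsp], ih d r hmem']
        congr 2
        exact List.map_congr_left (fun k _ => by simp [projCF, projOne, hsp])
      · simp only [List.foldl_cons]
        rw [show stepC (d, r) log = (d, r) by simp [stepC, hsp], ih d r hmem']
        congr 2
        exact List.map_congr_left (fun k _ => by simp [projCF, projOne, hsp])
      · have hsidK : sid ∈ K := hmem log List.mem_cons_self sid st hsp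
        simp only [List.foldl_cons]
        rw [stepC_runStep log sid st d r hsp,
          ih (d.insert sid (runStep (d.getD sid 0, 0) st).1)
            (r + (runStep (d.getD sid 0, 0) st).2) hmem']
        rw [add_assoc]
        congr 1
        symm
        apply sum_update K _ _ sid ((runStep (d.getD sid 0, 0) st).2) hnd hsidK
        · -- at sid: the head status is consumed by one runStep step
          have hproj : projCF (log :: rest) sid = st :: projCF rest sid := by
            rw [projCF_cons_two log rest sid sid st hsp, if_pos rfl]
          rw [hproj]
          simp only [List.foldl_cons]
          have hstep : runStep (d.getD sid 0, 0) st =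
              ((runStep (d.getD sid 0, 0) st).1, (runStep (d.getD sid 0, 0) st).2) := rfl
          rw [hstep, runStep_shift (projCF rest sid) (runStep (d.getD sid 0, 0) st).1
            (runStep (d.getD sid 0, 0) st).2]
          simp [PySem.Dict.getD_insert_self]
        · intro k hk
          have hproj : projCF (log :: rest) k = projCF rest k := by
            rw [projCF_cons_two log rest k sid st hsp, if_neg (fun h => hk h.symm)]
          rw [hproj, PySem.Dict.getD_insert]
          simp [hk]
      · simp only [List.foldl_cons]
        rw [show stepC (d, r) log = (d, r) by simp [stepC, hsp], ih d r hmem']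
        congr 2
        exact List.map_congr_left (fun k _ => by simp [projCF, projOne, hsp])

-- the grouped dict: lookups are the projections, keys collect the parseable sids
theorem group_getD (L : List String) (d : PySem.Dict String (List String)) (k : String) :
    (L.foldl groupStep d).getD k [] = d.getD k [] ++ projCF L k := by
  induction L generalizing d with
  | nil => simp [projCF]
  | cons log rest ih =>
      rcases hsp : PySem.Str.split₀ log with _ | ⟨sid, _ | ⟨st, _ | ⟨w, t⟩⟩⟩
      · simp only [List.foldl_cons]
        rw [show groupStep d log = d by simp [groupStep, hsp], ih]
        simp [projCF, projOne, hsp]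
      · simp only [List.foldl_cons]
        rw [show groupStep d log = d by simp [groupStep, hsp], ih]
        simp [projCF, projOne, hsp]
      · simp only [List.foldl_cons]
        rw [show groupStep d log = d.modify sid [] (· ++ [st]) by simp [groupStep, hsp], ih]
        rw [projCF_cons_two log rest k sid st hsp]
        by_cases hk : sid = k
        · subst hk
          rw [PySem.Dict.getD_modify_self, if_pos rfl]
          simp
        · rw [PySem.Dict.getD_modify, if_neg hk, if_neg (fun h => hk h.symm)]
      · simp only [List.foldl_cons]
        rw [show groupStep d log = d by simp [groupStep, hsp], ih]
        simp [projCF, projOne, hsp]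

theorem group_keys_nodup (L : List String) (d : PySem.Dict String (List String))
    (h : d.keys.Nodup) : (L.foldl groupStep d).keys.Nodup := by
  induction L generalizing d with
  | nil => exact h
  | cons log rest ih =>
      simp only [List.foldl_cons]
      apply ih
      rcases hsp : PySem.Str.split₀ log with _ | ⟨sid, _ | ⟨st, _ | ⟨w, t⟩⟩⟩ <;>
        simp only [groupStep, hsp]
      · exact h
      · exact h
      · rw [PySem.Dict.keys_modify]
        exact PySem.Dict.nodup_keys_insert d sid _ h
      · exact h

theorem group_keys_mono (L : List String) (d : PySem.Dict String (List String)) (k : String)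
    (h : k ∈ d.keys) : k ∈ (L.foldl groupStep d).keys := by
  induction L generalizing d with
  | nil => exact h
  | cons log rest ih =>
      simp only [List.foldl_cons]
      apply ih
      rcases hsp : PySem.Str.split₀ log with _ | ⟨sid, _ | ⟨st, _ | ⟨w, t⟩⟩⟩ <;>
        simp only [groupStep, hsp]
      · exact h
      · exact h
      · rw [PySem.Dict.keys_modify]
        simp only [PySem.Dict.mem_keys_insert]
        exact Or.inr h
      · exact h

theorem group_keys_mem (L : List String) (d : PySem.Dict String (List String))
    (log sid st : String) (hlog : log ∈ L) (hsp : PySem.Str.split₀ log = [sid, st]) :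
    sid ∈ (L.foldl groupStep d).keys := by
  induction L generalizing d with
  | nil => simp at hlog
  | cons l rest ih =>
      simp only [List.foldl_cons]
      rcases List.mem_cons.mp hlog with h | h
      · subst h
        apply group_keys_mono
        rw [show groupStep d log = d.modify sid [] (· ++ [st]) by simp [groupStep, hsp],
          PySem.Dict.keys_modify]
        simp [PySem.Dict.mem_keys_insert]
      · exact ih _ h

-- B's value as a sum over the grouped keys
theorem values_fold_sum (vs : List (List String)) (t : Int) :
    vs.foldl (fun total statuses => (statuses.foldl runStep (0, total)).2) t
      = t + (vs.map (fun ss => (ss.foldl runStep (0, 0)).2)).sum := by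
  induction vs generalizing t with
  | nil => simp
  | cons v vs ih =>
      simp only [List.foldl_cons, List.map_cons, List.sum_cons]
      rw [runStep_shift v 0 t, ih]
      ring

theorem alt_eq_sum (n : Int) (logs : List String) :
    countFaults_alt n logs
      = ((groupLogs logs).keys.map (fun k => ((projCF logs k).foldl runStep (0, 0)).2)).sum := by
  have hnd : (groupLogs logs).keys.Nodup :=
    group_keys_nodup logs PySem.Dict.empty (by simp)
  unfold countFaults_alt
  rw [values_fold_sum, PySem.Dict.values_eq_map_keys _ hnd [], List.map_map]
  simp only [zero_add, Function.comp_def]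
  congr 1
  apply List.map_congr_left
  intro k _
  rw [show (groupLogs logs).getD k [] = projCF logs k by
    simpa using group_getD logs PySem.Dict.empty k]

-- ===== VERDICT (by name: the statement is the Claim_ definition above) =====
theorem countFaults_spec : Claim_equal_countFaults := by
  intro n logs _ _
  unfold Spec_countFaults
  unfold countFaults
  rw [foldCF_sim logs _ PySem.Dict.empty 0 (by intro k; simp [trailN]),
    foldC_sum logs (groupLogs logs).keys PySem.Dict.empty 0
      (group_keys_nodup logs PySem.Dict.empty (by simp))
      (fun log hl sid st hsp => group_keys_mem logs PySem.Dict.empty log sid st hl hsp),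
    alt_eq_sum n logs]
  simp
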